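-- pv_equiv track=rewrite | github.com/shubhamkriitr/ml4hc_nlp | src/text_processing.py | split_inputs_for_workers
-- ===== SOURCE A (Python) =====
-- def split_inputs_for_workers(text_dataset, num_workers):
--     split_data = []
--     n = len(text_dataset)
--     n_per_core = n // num_workers
--     remainder = n % num_workers
--
--     start = 0
--     for i in range(num_workers):
--         end = start + n_per_core
--         if remainder > 0:
--             end += 1
--             remainder -= 1
--         if start == end:
--             continue
--         split_data.append(text_dataset[start:end])
--         start = end
--
--     return split_data
-- ===== SOURCE B (Python) =====
-- def split_inputs_for_workers(text_dataset, num_workers):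
--     q = len(text_dataset) // num_workers
--     r = len(text_dataset) % num_workers
--     chunks = []
--     for i in range(num_workers):
--         start = i * q + min(i, r)
--         end = (i + 1) * q + min(i + 1, r)
--         if start != end:
--             chunks.append(text_dataset[start:end])
--     return chunks
-- ===== Notes on version B (the rewrite author's own statement) =====
-- stated objective: alternative
-- what changed: Each chunk's boundaries are computed in closed form from its index (start = i*q + min(i,r)) instead of threading a mutable start/remainder accumulator through the loop.
import Mathlib
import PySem

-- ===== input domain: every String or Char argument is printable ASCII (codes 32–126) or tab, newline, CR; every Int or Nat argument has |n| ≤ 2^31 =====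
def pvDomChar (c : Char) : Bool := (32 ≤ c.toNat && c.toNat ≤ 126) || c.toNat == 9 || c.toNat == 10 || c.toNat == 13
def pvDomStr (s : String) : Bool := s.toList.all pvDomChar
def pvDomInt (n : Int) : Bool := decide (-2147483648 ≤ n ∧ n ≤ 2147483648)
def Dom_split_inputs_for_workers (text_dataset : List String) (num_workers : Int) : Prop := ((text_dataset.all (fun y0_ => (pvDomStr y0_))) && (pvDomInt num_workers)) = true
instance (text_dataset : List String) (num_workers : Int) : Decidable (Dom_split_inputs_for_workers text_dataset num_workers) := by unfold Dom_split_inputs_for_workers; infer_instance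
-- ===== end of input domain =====

-- B computes each chunk's boundaries in closed form from the index i instead of
-- threading a mutable start/remainder accumulator through the loop (alternative decomposition).

-- ===== PORT A =====
-- one loop iteration of A: state is (split_data, start, remainder)
def pvStepA (ds : List String) (q : Int)
    (st : List (List String) × Int × Int) (_i : Int) :
    List (List String) × Int × Int :=
  let sd := st.1
  let start := st.2.1
  let rem := st.2.2
  let e0 := start + q
  let e := if rem > 0 then e0 + 1 else e0
  let rem' := if rem > 0 then rem - 1 else rem
  if start = e then (sd, start, rem')
  else (sd ++ [PySem.List.slice ds (some start) (some e)], e, rem')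

def split_inputs_for_workers (text_dataset : List String) (num_workers : Int) : List (List String) :=
  let n : Int := text_dataset.length
  let n_per_core := PySem.Int.floordiv n num_workers
  let remainder := PySem.Int.mod n num_workers
  ((PySem.List.pyRange 0 num_workers 1).foldl
    (pvStepA text_dataset n_per_core) ([], 0, remainder)).1

-- ===== PORT B =====
def pvChunkB (ds : List String) (q r : Int)
    (acc : List (List String)) (i : Int) : List (List String) :=
  let s := i * q + min i r
  let e := (i + 1) * q + min (i + 1) r
  if s = e then acc else acc ++ [PySem.List.slice ds (some s) (some e)]

def split_inputs_for_workers_alt (text_dataset : List String) (num_workers : Int) : List (List String) :=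
  let q := PySem.Int.floordiv (text_dataset.length : Int) num_workers
  let r := PySem.Int.mod (text_dataset.length : Int) num_workers
  (PySem.List.pyRange 0 num_workers 1).foldl (pvChunkB text_dataset q r) []

-- ===== PRECONDITION & SPEC =====
-- Python raises ZeroDivisionError (in both A and B) when num_workers == 0; that is the only exclusion.
def Pre_split_inputs_for_workers (text_dataset : List String) (num_workers : Int) : Prop :=
  num_workers ≠ 0

instance (text_dataset : List String) (num_workers : Int) : Decidable (Pre_split_inputs_for_workers text_dataset num_workers) := by
  unfold Pre_split_inputs_for_workers; infer_instance

def pvWitness_split_inputs_for_workers : List String × Int := (["a", "b", "c"], 2)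

def Spec_split_inputs_for_workers (text_dataset : List String) (num_workers : Int) (out : List (List String)) : Prop := out = split_inputs_for_workers_alt text_dataset num_workers
instance (text_dataset : List String) (num_workers : Int) (out : List (List String)) : Decidable (Spec_split_inputs_for_workers text_dataset num_workers out) := by unfold Spec_split_inputs_for_workers; infer_instance

-- ===== CLAIM (what is proved, stated in full; the proofs are below) =====
def Claim_equal_split_inputs_for_workers : Prop := ∀ (text_dataset : List String) (num_workers : Int), Dom_split_inputs_for_workers text_dataset num_workers → Pre_split_inputs_for_workers text_dataset num_workers → Spec_split_inputs_for_workers text_dataset num_workers (split_inputs_for_workers text_dataset num_workers)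

-- ===== LEMMAS AND PROOFS =====

-- Invariant: after m iterations, A's accumulated (start, remainder) equal their
-- closed forms m*q + min m r and r - min m r, and the chunk lists agree.
lemma foldl_range_invariant (ds : List String) (q r : Int)
    (hq : 0 ≤ q) (hr : 0 ≤ r) (m : Nat) :
    (List.range m).foldl (fun st (k : Nat) => pvStepA ds q st (k : Int)) ([], 0, r)
      = ((List.range m).foldl (fun acc (k : Nat) => pvChunkB ds q r acc (k : Int)) [],
         (m : Int) * q + min (m : Int) r, r - min (m : Int) r) := by
  induction m with
  | zero => simp; omega
  | succ m ih =>
    rw [List.range_succ, List.foldl_append, List.foldl_append, ih]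
    simp only [List.foldl_cons, List.foldl_nil]
    by_cases hm : (m : Int) < r
    · have h1 : min (m : Int) r = (m : Int) := by omega
      have h2 : min ((m : Int) + 1) r = (m : Int) + 1 := by omega
      have hrem : r - (m : Int) > 0 := by omega
      simp only [pvStepA, pvChunkB, h1, h2, hrem, if_pos, Nat.cast_succ]
      have hne : (m : Int) * q + (m : Int) ≠ (m : Int) * q + (m : Int) + q + 1 := by omega
      have hne' : (m : Int) * q + (m : Int) ≠ ((m : Int) + 1) * q + ((m : Int) + 1) := by
        nlinarith
      rw [if_neg hne, if_neg hne']
      rw [show (m : Int) * q + (m : Int) + q + 1 = ((m : Int) + 1) * q + ((m : Int) + 1) by ring]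
      rw [show r - (m : Int) - 1 = r - ((m : Int) + 1) by ring]
    · have h1 : min (m : Int) r = r := by omega
      have h2 : min ((m : Int) + 1) r = r := by omega
      have hrem : ¬ (r - r > 0) := by omega
      simp only [pvStepA, pvChunkB, h1, h2, if_neg hrem, Nat.cast_succ]
      by_cases hq0 : q = 0
      · subst hq0
        simp
      · have hqpos : 0 < q := lt_of_le_of_ne hq (Ne.symm hq0)
        have hne : (m : Int) * q + r ≠ (m : Int) * q + r + q := by omega
        have hne' : (m : Int) * q + r ≠ ((m : Int) + 1) * q + r := by nlinarith
        rw [if_neg hne, if_neg hne']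
        rw [show (m : Int) * q + r + q = ((m : Int) + 1) * q + r by ring]

-- ===== VERDICT (by name: the statement is the Claim_ definition above) =====
theorem split_inputs_for_workers_spec : Claim_equal_split_inputs_for_workers := by
  intro ds nw _ hpre
  unfold Spec_split_inputs_for_workers split_inputs_for_workers split_inputs_for_workers_alt
  rcases lt_or_gt_of_ne hpre with hneg | hpos
  · rw [PySem.List.pyRange_one_eq_nil (by omega)]
    simp
  · have hq : 0 ≤ PySem.Int.floordiv (ds.length : Int) nw := by
      rw [PySem.Int.floordiv_eq_ediv_of_pos hpos]
      exact Int.ediv_nonneg (by positivity) (le_of_lt hpos)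
    have hr : 0 ≤ PySem.Int.mod (ds.length : Int) nw := by
      rw [PySem.Int.mod_eq_emod_of_pos hpos]
      exact Int.emod_nonneg _ (by omega)
    rw [PySem.List.pyRange_one]
    simp only [List.foldl_map, zero_add]
    rw [foldl_range_invariant ds _ _ hq hr]
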